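-- pv_equiv track=rewrite | github.com/x0cloud69/david | ky-codyssey-main/Codyseey/JTP5-1/door_hacking_thead_2.py | get_chunk_passwords
-- ===== SOURCE A (Python) =====
-- from typing import List, Generator
--
-- def get_chunk_passwords(start_idx: int, chunk_size: int, base_pwd: List) -> List[str]:
--     """청크 단위로 비밀번호 생성"""
--     passwords = []
--     for i in range(chunk_size):
--         current = start_idx + i
--         pwd = []
--         remaining = current
--         for _ in range(6):
--             pwd.append(base_pwd[remaining % len(base_pwd)])
--             remaining //= len(base_pwd)
--         passwords.append(''.join(str(x) for x in reversed(pwd)))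
--     return passwords
-- ===== SOURCE B (Python) =====
-- def get_chunk_passwords(start_idx, chunk_size, base_pwd):
--     """Odometer: compute the first password's 6 digit-indices once, then
--     advance them like an odometer for each subsequent password."""
--     n = len(base_pwd)
--     idxs = []          # least-significant digit first
--     rem = start_idx
--     for _ in range(6):
--         idxs.append(rem % n)
--         rem //= n
--     out = []
--     for _ in range(chunk_size):
--         out.append(''.join(str(base_pwd[j]) for j in reversed(idxs)))
--         for k in range(6):          # increment with carry, overflow discarded
--             idxs[k] += 1
--             if idxs[k] < n:
--                 break
--             idxs[k] = 0
--     return out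
-- ===== Notes on version B (the rewrite author's own statement) =====
-- stated objective: alternative
-- what changed: Instead of recomputing all 6 digits of start_idx+i with a modulo/division loop for every password, B computes the first password's digit indices once and advances them as an odometer (increment with carry, overflow discarded) across one forward pass.
-- outside the precondition, e.g. on get_chunk_passwords(0, 0, []): A returns [], B raises ZeroDivisionError
import Mathlib
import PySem

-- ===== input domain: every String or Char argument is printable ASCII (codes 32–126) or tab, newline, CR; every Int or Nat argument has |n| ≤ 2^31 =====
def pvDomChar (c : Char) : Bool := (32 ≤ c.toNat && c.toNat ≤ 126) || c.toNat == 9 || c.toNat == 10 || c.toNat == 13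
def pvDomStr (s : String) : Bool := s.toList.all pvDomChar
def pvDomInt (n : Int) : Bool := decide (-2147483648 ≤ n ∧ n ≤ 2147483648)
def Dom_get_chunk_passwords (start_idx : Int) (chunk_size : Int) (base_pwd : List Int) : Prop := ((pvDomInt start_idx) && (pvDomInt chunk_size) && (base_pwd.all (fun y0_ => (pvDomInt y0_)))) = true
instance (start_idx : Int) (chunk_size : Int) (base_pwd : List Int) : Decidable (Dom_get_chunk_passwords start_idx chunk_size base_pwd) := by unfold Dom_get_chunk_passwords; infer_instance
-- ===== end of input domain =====

-- B replaces A's per-password 6-division digit recomputation by a single digit-index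
-- computation plus an odometer increment carried across one forward pass (objective: alternative decomposition).


-- ===== PORT A =====
-- inner 'for _ in range(6)' loop: appends base_pwd[remaining % len] and floor-divides remaining
def aDigitLoop (base_pwd : List Int) (remaining : Int) : Nat → List Int
  | 0 => []
  | k + 1 =>
      PySem.List.pyGetD base_pwd (PySem.Int.mod remaining (base_pwd.length : Int)) 0
        :: aDigitLoop base_pwd (PySem.Int.floordiv remaining (base_pwd.length : Int)) k

-- ''.join(str(x) for x in reversed(pwd))
def aRender (pwd : List Int) : String :=
  PySem.Str.join "" (pwd.reverse.map PySem.Int.toStr)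

def get_chunk_passwords (start_idx : Int) (chunk_size : Int) (base_pwd : List Int) : List String :=
  (PySem.List.pyRange 0 chunk_size 1).foldl
    (fun passwords i => passwords ++ [aRender (aDigitLoop base_pwd (start_idx + i) 6)]) []

-- ===== PORT B =====
-- first password's digit indices, least-significant first
def bDigits (n : Int) (rem : Int) : Nat → List Int
  | 0 => []
  | k + 1 => PySem.Int.mod rem n :: bDigits n (PySem.Int.floordiv rem n) k

-- odometer increment from the least-significant end, carry out discarded
def bInc (n : Int) : List Int → List Int
  | [] => []
  | d :: ds => if d + 1 < n then (d + 1) :: ds else 0 :: bInc n ds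

-- ''.join(str(base_pwd[j]) for j in reversed(idxs))
def bRender (base_pwd : List Int) (idxs : List Int) : String :=
  PySem.Str.join "" (idxs.reverse.map (fun j => PySem.Int.toStr (PySem.List.pyGetD base_pwd j 0)))

def bLoop (base_pwd : List Int) (idxs : List Int) : Nat → List String
  | 0 => []
  | k + 1 => bRender base_pwd idxs :: bLoop base_pwd (bInc (base_pwd.length : Int) idxs) k

def get_chunk_passwords_alt (start_idx : Int) (chunk_size : Int) (base_pwd : List Int) : List String :=
  bLoop base_pwd (bDigits (base_pwd.length : Int) start_idx 6) chunk_size.toNat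

-- ===== PRECONDITION & SPEC =====
-- Pre_ excludes empty base_pwd: there A raises ZeroDivisionError whenever chunk_size > 0,
-- and B raises it even for chunk_size ≤ 0 (A vacuously returns [] then) since B builds the
-- first password's digits up front.
def Pre_get_chunk_passwords (start_idx : Int) (chunk_size : Int) (base_pwd : List Int) : Prop :=
  base_pwd ≠ []
instance (start_idx : Int) (chunk_size : Int) (base_pwd : List Int) : Decidable (Pre_get_chunk_passwords start_idx chunk_size base_pwd) := by unfold Pre_get_chunk_passwords; infer_instance

def pvWitness_get_chunk_passwords : Int × Int × List Int := (7, 3, [1, 2])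

def Spec_get_chunk_passwords (start_idx : Int) (chunk_size : Int) (base_pwd : List Int) (out : List String) : Prop := out = get_chunk_passwords_alt start_idx chunk_size base_pwd
instance (start_idx : Int) (chunk_size : Int) (base_pwd : List Int) (out : List String) : Decidable (Spec_get_chunk_passwords start_idx chunk_size base_pwd out) := by unfold Spec_get_chunk_passwords; infer_instance

-- ===== CLAIM (what is proved, stated in full; the proofs are below) =====
def Claim_equal_get_chunk_passwords : Prop := ∀ (start_idx : Int) (chunk_size : Int) (base_pwd : List Int), Dom_get_chunk_passwords start_idx chunk_size base_pwd → Pre_get_chunk_passwords start_idx chunk_size base_pwd → Spec_get_chunk_passwords start_idx chunk_size base_pwd (get_chunk_passwords start_idx chunk_size base_pwd)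

-- ===== LEMMAS AND PROOFS =====

-- A's digit values are B's digit indices looked up in base_pwd
theorem aDigitLoop_eq_map (base_pwd : List Int) (rem : Int) (k : Nat) :
    aDigitLoop base_pwd rem k
      = (bDigits (base_pwd.length : Int) rem k).map (fun j => PySem.List.pyGetD base_pwd j 0) := by
  induction k generalizing rem with
  | zero => rfl
  | succ k ih => simp [aDigitLoop, bDigits, ih]

theorem aRender_eq_bRender (base_pwd : List Int) (rem : Int) (k : Nat) :
    aRender (aDigitLoop base_pwd rem k) = bRender base_pwd (bDigits (base_pwd.length : Int) rem k) := by
  simp [aRender, bRender, aDigitLoop_eq_map, List.map_reverse, List.map_map, Function.comp_def]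

-- the odometer increment is the digit decomposition of rem + 1
theorem bInc_bDigits (n rem : Int) (hn : 0 < n) (k : Nat) :
    bInc n (bDigits n rem k) = bDigits n (rem + 1) k := by
  induction k generalizing rem with
  | zero => rfl
  | succ k ih =>
    have h1 := PySem.Int.floordiv_mul_add_mod rem n
    have h2 := PySem.Int.floordiv_mul_add_mod (rem + 1) n
    have hr0 : 0 ≤ PySem.Int.mod rem n := PySem.Int.mod_nonneg rem hn
    have hr1 : PySem.Int.mod rem n < n := PySem.Int.mod_lt rem hn
    have hs0 : 0 ≤ PySem.Int.mod (rem + 1) n := PySem.Int.mod_nonneg (rem + 1) hn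
    have hs1 : PySem.Int.mod (rem + 1) n < n := PySem.Int.mod_lt (rem + 1) hn
    by_cases hc : PySem.Int.mod rem n + 1 < n
    · -- no carry: quotient unchanged, digit bumps
      have hq : PySem.Int.floordiv (rem + 1) n = PySem.Int.floordiv rem n := by
        rw [PySem.Int.floordiv_eq_iff_of_pos hn]
        constructor <;> nlinarith
      have hm : PySem.Int.mod (rem + 1) n = PySem.Int.mod rem n + 1 := by
        rw [hq] at h2; linarith
      simp [bDigits, bInc, hc, hm, hq]
    · -- carry: digit wraps to 0, quotient increments; recurse
      have hq : PySem.Int.floordiv (rem + 1) n = PySem.Int.floordiv rem n + 1 := by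
        rw [PySem.Int.floordiv_eq_iff_of_pos hn]
        constructor <;> nlinarith
      have hm : PySem.Int.mod (rem + 1) n = 0 := by
        rw [hq] at h2; nlinarith
      simp [bDigits, bInc, hc, hm, hq, ih]

-- A's outer fold equals B's odometer loop
theorem fold_eq_bLoop (base_pwd : List Int) (s : Int) (hn : 0 < (base_pwd.length : Int)) :
    ∀ (k : Nat) (a c : Int), (c - a).toNat = k → ∀ (acc : List String),
      (PySem.List.pyRange a c 1).foldl
          (fun passwords i => passwords ++ [aRender (aDigitLoop base_pwd (s + i) 6)]) acc
        = acc ++ bLoop base_pwd (bDigits (base_pwd.length : Int) (s + a) 6) k := by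
  intro k
  induction k with
  | zero =>
    intro a c hk acc
    rw [PySem.List.pyRange_one_eq_nil (by omega)]
    simp [bLoop]
  | succ k ih =>
    intro a c hk acc
    rw [PySem.List.pyRange_one_cons (by omega)]
    simp only [List.foldl_cons]
    rw [ih (a + 1) c (by omega)]
    have hstep : bInc (base_pwd.length : Int) (bDigits (base_pwd.length : Int) (s + a) 6)
        = bDigits (base_pwd.length : Int) (s + (a + 1)) 6 := by
      rw [bInc_bDigits _ _ hn]; ring_nf
    simp [bLoop, ← hstep, aRender_eq_bRender]

-- ===== VERDICT (by name: the statement is the Claim_ definition above) =====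
theorem get_chunk_passwords_spec : Claim_equal_get_chunk_passwords := by
  intro start_idx chunk_size base_pwd _ hpre
  have hn : 0 < (base_pwd.length : Int) := by
    have : base_pwd.length ≠ 0 := by simpa using hpre
    omega
  unfold Spec_get_chunk_passwords get_chunk_passwords get_chunk_passwords_alt
  rw [fold_eq_bLoop base_pwd start_idx hn chunk_size.toNat 0 chunk_size (by omega)]
  simp
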